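-- pv_equiv track=rewrite | github.com/IanPereiraPrice/probable-disco | maplestory_idle/weapon_summoning.py | get_level_from_summons
-- ===== SOURCE A (Python) =====
-- LEVEL_THRESHOLDS = {
--     1: 0,        # Starting level
--     2: 100,
--     3: 250,
--     4: 500,
--     5: 800,
--     6: 1300,
--     7: 1800,
--     8: 2400,
--     9: 3200,
--     10: 4100,
--     11: 5400,
--     12: 7000,
--     13: 9300,
--     14: 12100,
--     15: 15600,
--     16: 31200,
--     17: 46800,
-- }
--
-- def get_level_from_summons(total_summons: int) -> int:
--     """Get the summoning level based on total summons performed."""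
--     level = 1
--     for lvl, threshold in sorted(LEVEL_THRESHOLDS.items()):
--         if total_summons >= threshold:
--             level = lvl
--         else:
--             break
--     return level
-- ===== SOURCE B (Python) =====
-- LEVEL_THRESHOLDS = {
--     1: 0, 2: 100, 3: 250, 4: 500, 5: 800, 6: 1300, 7: 1800, 8: 2400,
--     9: 3200, 10: 4100, 11: 5400, 12: 7000, 13: 9300, 14: 12100,
--     15: 15600, 16: 31200, 17: 46800,
-- }
--
-- _THRESHOLDS = sorted(LEVEL_THRESHOLDS.values())
--
-- def get_level_from_summons(total_summons: int) -> int: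
--     """Get the summoning level based on total summons performed."""
--     lo, hi = 0, len(_THRESHOLDS)
--     while lo < hi:
--         mid = (lo + hi) // 2
--         if _THRESHOLDS[mid] <= total_summons:
--             lo = mid + 1
--         else:
--             hi = mid
--     return max(1, lo)
-- ===== Notes on version B (the rewrite author's own statement) =====
-- stated objective: alternative
-- what changed: Replaced the linear for-loop break-scan over sorted (level, threshold) pairs with a hand-written binary search (upper bound) over a prebuilt sorted threshold table, returning max(1, index).
import Mathlib
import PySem

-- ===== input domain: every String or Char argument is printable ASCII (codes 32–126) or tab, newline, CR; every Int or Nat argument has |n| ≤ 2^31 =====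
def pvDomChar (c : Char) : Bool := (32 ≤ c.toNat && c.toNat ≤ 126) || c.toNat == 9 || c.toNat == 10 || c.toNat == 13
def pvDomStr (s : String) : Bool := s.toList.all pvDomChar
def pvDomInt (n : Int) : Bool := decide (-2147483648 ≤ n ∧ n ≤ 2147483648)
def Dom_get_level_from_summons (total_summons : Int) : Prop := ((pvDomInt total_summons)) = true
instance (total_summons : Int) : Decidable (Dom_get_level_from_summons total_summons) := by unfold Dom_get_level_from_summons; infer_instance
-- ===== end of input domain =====

-- B replaces A's linear break-scan over the sorted (level, threshold) pairs by a hand-written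
-- binary search (upper bound) over a prebuilt sorted threshold table; equivalence of RETURN values proved.

-- ===== PORT A =====
-- LEVEL_THRESHOLDS as an association list in insertion order
def levelThresholds : List (Int × Int) :=
  [(1,0),(2,100),(3,250),(4,500),(5,800),(6,1300),(7,1800),(8,2400),(9,3200),
   (10,4100),(11,5400),(12,7000),(13,9300),(14,12100),(15,15600),(16,31200),(17,46800)]

-- the for-loop with break: returns `level` as soon as the condition fails
def loopA (total_summons : Int) : List (Int × Int) → Int → Int
  | [], level => level
  | (lvl, threshold) :: rest, level =>
      if total_summons ≥ threshold then loopA total_summons rest lvl else level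

def get_level_from_summons (total_summons : Int) : Int :=
  loopA total_summons (PySem.List.sorted levelThresholds (fun p => p.1) false) 1

-- ===== PORT B =====
-- sorted(LEVEL_THRESHOLDS.values())
def thresholdTable : List Int :=
  PySem.List.sorted [0,100,250,500,800,1300,1800,2400,3200,4100,5400,7000,9300,12100,15600,31200,46800]
    (fun x => x) false

-- the while-loop of Source B's binary search (lo, hi are list indices)
def bsearchB (total_summons : Int) (lo hi : Nat) : Nat :=
  if lo < hi then
    let mid := (lo + hi) / 2
    if thresholdTable.getD mid 0 ≤ total_summons then bsearchB total_summons (mid + 1) hi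
    else bsearchB total_summons lo mid
  else lo
termination_by hi - lo
decreasing_by all_goals omega

def get_level_from_summons_alt (total_summons : Int) : Int :=
  max 1 (bsearchB total_summons 0 thresholdTable.length : Int)

-- ===== PRECONDITION & SPEC =====
def Spec_get_level_from_summons (total_summons : Int) (out : Int) : Prop := out = get_level_from_summons_alt total_summons
instance (total_summons : Int) (out : Int) : Decidable (Spec_get_level_from_summons total_summons out) := by unfold Spec_get_level_from_summons; infer_instance

-- ===== CLAIM (what is proved, stated in full; the proofs are below) =====
def Claim_equal_get_level_from_summons : Prop := ∀ (total_summons : Int), Dom_get_level_from_summons total_summons → Spec_get_level_from_summons total_summons (get_level_from_summons total_summons)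

-- ===== LEMMAS AND PROOFS =====

-- the value of the binary search written as a literal comparison tree (used only by the proof)
def pvBsearchTree (t : Int) : Nat :=
  (if (3200:Int) ≤ t then (if (12100:Int) ≤ t then (if (31200:Int) ≤ t then (if (46800:Int) ≤ t then 17 else 16) else (if (15600:Int) ≤ t then 15 else 14)) else (if (7000:Int) ≤ t then (if (9300:Int) ≤ t then 13 else 12) else (if (5400:Int) ≤ t then 11 else (if (4100:Int) ≤ t then 10 else 9)))) else (if (800:Int) ≤ t then (if (1800:Int) ≤ t then (if (2400:Int) ≤ t then 8 else 7) else (if (1300:Int) ≤ t then 6 else 5)) else (if (250:Int) ≤ t then (if (500:Int) ≤ t then 4 else 3) else (if (100:Int) ≤ t then 2 else (if (0:Int) ≤ t then 1 else 0)))))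
-- fully unfolded form of the binary search on the 17-entry table (proved by unfolding the recursion)
theorem bsearchB_step (t : Int) (lo hi : Nat) (h : lo < hi) : bsearchB t lo hi =
    if thresholdTable.getD ((lo + hi) / 2) 0 ≤ t then bsearchB t ((lo + hi) / 2 + 1) hi
    else bsearchB t lo ((lo + hi) / 2) := by
  rw [bsearchB]; simp [h]

theorem bsearchB_base (t : Int) (lo hi : Nat) (h : ¬ lo < hi) : bsearchB t lo hi = lo := by
  rw [bsearchB]; simp [h]

-- both programs evaluated to the same literal threshold chain
def pvChain (t : Int) : Int := (if t ≥ (0:Int) then (if t ≥ (100:Int) then (if t ≥ (250:Int) then (if t ≥ (500:Int) then (if t ≥ (800:Int) then (if t ≥ (1300:Int) then (if t ≥ (1800:Int) then (if t ≥ (2400:Int) then (if t ≥ (3200:Int) then (if t ≥ (4100:Int) then (if t ≥ (5400:Int) then (if t ≥ (7000:Int) then (if t ≥ (9300:Int) then (if t ≥ (12100:Int) then (if t ≥ (15600:Int) then (if t ≥ (31200:Int) then (if t ≥ (46800:Int) then (17:Int) else (16:Int)) else (15:Int)) else (14:Int)) else (13:Int)) else (12:Int)) else (11:Int)) else (10:Int))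 else (9:Int)) else (8:Int)) else (7:Int)) else (6:Int)) else (5:Int)) else (4:Int)) else (3:Int)) else (2:Int)) else (1:Int)) else (1:Int))

theorem bsearchB_unfolded (t : Int) : bsearchB t 0 17 =
    pvBsearchTree t := by
  unfold pvBsearchTree
  have hT : thresholdTable = [0,100,250,500,800,1300,1800,2400,3200,4100,5400,7000,9300,12100,15600,31200,46800] := by decide
  simp [bsearchB_step, bsearchB_base, hT]

-- ===== VERDICT (by name: the statement is the Claim_ definition above) =====
set_option maxRecDepth 8000 in
set_option maxHeartbeats 4000000 in
theorem A_eval (t : Int) : get_level_from_summons t = pvChain t := by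
  unfold get_level_from_summons pvChain
  have hS : PySem.List.sorted levelThresholds (fun p => p.1) false = levelThresholds := by decide
  rw [hS]
  simp only [loopA, levelThresholds]

set_option maxRecDepth 8000 in
set_option maxHeartbeats 4000000 in
theorem B_eval (t : Int) : get_level_from_summons_alt t = pvChain t := by
  unfold get_level_from_summons_alt pvChain
  have hL : thresholdTable.length = 17 := by decide
  rw [hL, bsearchB_unfolded]
  by_cases h16 : (46800:Int) ≤ t
  · simp only [pvBsearchTree, ge_iff_le, h16, (show (0:Int) ≤ t by omega), (show (100:Int) ≤ t by omega), (show (250:Int) ≤ t by omega), (show (500:Int) ≤ t by omega), (show (800:Int) ≤ t by omega), (show (1300:Int) ≤ t by omega), (show (1800:Int) ≤ t by omega), (show (2400:Int) ≤ t by omega), (show (3200:Int) ≤ t by omega), (show (4100:Int) ≤ t by omega), (show (5400:Int) ≤ t by omega), (show (7000:Int) ≤ t by omega), (show (9300:Int) ≤ t by omega), (show (12100:Int) ≤ t by omega), (show (15600:Int) ≤ t by omega), (show (31200:Int) ≤ t by omega), ite_true]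
    norm_num
  by_cases h15 : (31200:Int) ≤ t
  · simp only [pvBsearchTree, ge_iff_le, h15, (show (0:Int) ≤ t by omega), (show (100:Int) ≤ t by omega), (show (250:Int) ≤ t by omega), (show (500:Int) ≤ t by omega), (show (800:Int) ≤ t by omega), (show (1300:Int) ≤ t by omega), (show (1800:Int) ≤ t by omega), (show (2400:Int) ≤ t by omega), (show (3200:Int) ≤ t by omega), (show (4100:Int) ≤ t by omega), (show (5400:Int) ≤ t by omega), (show (7000:Int) ≤ t by omega), (show (9300:Int) ≤ t by omega), (show (12100:Int) ≤ t by omega), (show (15600:Int) ≤ t by omega), (show ¬ (46800:Int) ≤ t by omega), ite_true, ite_false]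
    norm_num
  by_cases h14 : (15600:Int) ≤ t
  · simp only [pvBsearchTree, ge_iff_le, h14, (show (0:Int) ≤ t by omega), (show (100:Int) ≤ t by omega), (show (250:Int) ≤ t by omega), (show (500:Int) ≤ t by omega), (show (800:Int) ≤ t by omega), (show (1300:Int) ≤ t by omega), (show (1800:Int) ≤ t by omega), (show (2400:Int) ≤ t by omega), (show (3200:Int) ≤ t by omega), (show (4100:Int) ≤ t by omega), (show (5400:Int) ≤ t by omega), (show (7000:Int) ≤ t by omega), (show (9300:Int) ≤ t by omega), (show (12100:Int) ≤ t by omega), (show ¬ (31200:Int) ≤ t by omega), (show ¬ (46800:Int) ≤ t by omega), ite_true, ite_false]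
    norm_num
  by_cases h13 : (12100:Int) ≤ t
  · simp only [pvBsearchTree, ge_iff_le, h13, (show (0:Int) ≤ t by omega), (show (100:Int) ≤ t by omega), (show (250:Int) ≤ t by omega), (show (500:Int) ≤ t by omega), (show (800:Int) ≤ t by omega), (show (1300:Int) ≤ t by omega), (show (1800:Int) ≤ t by omega), (show (2400:Int) ≤ t by omega), (show (3200:Int) ≤ t by omega), (show (4100:Int) ≤ t by omega), (show (5400:Int) ≤ t by omega), (show (7000:Int) ≤ t by omega), (show (9300:Int) ≤ t by omega), (show ¬ (15600:Int) ≤ t by omega), (show ¬ (31200:Int) ≤ t by omega), (show ¬ (46800:Int) ≤ t by omega), ite_true, ite_false]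
    norm_num
  by_cases h12 : (9300:Int) ≤ t
  · simp only [pvBsearchTree, ge_iff_le, h12, (show (0:Int) ≤ t by omega), (show (100:Int) ≤ t by omega), (show (250:Int) ≤ t by omega), (show (500:Int) ≤ t by omega), (show (800:Int) ≤ t by omega), (show (1300:Int) ≤ t by omega), (show (1800:Int) ≤ t by omega), (show (2400:Int) ≤ t by omega), (show (3200:Int) ≤ t by omega), (show (4100:Int) ≤ t by omega), (show (5400:Int) ≤ t by omega), (show (7000:Int) ≤ t by omega), (show ¬ (12100:Int) ≤ t by omega), (show ¬ (15600:Int) ≤ t by omega), (show ¬ (31200:Int) ≤ t by omega), (show ¬ (46800:Int) ≤ t by omega), ite_true, ite_false]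
    norm_num
  by_cases h11 : (7000:Int) ≤ t
  · simp only [pvBsearchTree, ge_iff_le, h11, (show (0:Int) ≤ t by omega), (show (100:Int) ≤ t by omega), (show (250:Int) ≤ t by omega), (show (500:Int) ≤ t by omega), (show (800:Int) ≤ t by omega), (show (1300:Int) ≤ t by omega), (show (1800:Int) ≤ t by omega), (show (2400:Int) ≤ t by omega), (show (3200:Int) ≤ t by omega), (show (4100:Int) ≤ t by omega), (show (5400:Int) ≤ t by omega), (show ¬ (9300:Int) ≤ t by omega), (show ¬ (12100:Int) ≤ t by omega), (show ¬ (15600:Int) ≤ t by omega), (show ¬ (31200:Int) ≤ t by omega), (show ¬ (46800:Int) ≤ t by omega), ite_true, ite_false]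
    norm_num
  by_cases h10 : (5400:Int) ≤ t
  · simp only [pvBsearchTree, ge_iff_le, h10, (show (0:Int) ≤ t by omega), (show (100:Int) ≤ t by omega), (show (250:Int) ≤ t by omega), (show (500:Int) ≤ t by omega), (show (800:Int) ≤ t by omega), (show (1300:Int) ≤ t by omega), (show (1800:Int) ≤ t by omega), (show (2400:Int) ≤ t by omega), (show (3200:Int) ≤ t by omega), (show (4100:Int) ≤ t by omega), (show ¬ (7000:Int) ≤ t by omega), (show ¬ (9300:Int) ≤ t by omega), (show ¬ (12100:Int) ≤ t by omega), (show ¬ (15600:Int) ≤ t by omega), (show ¬ (31200:Int) ≤ t by omega), (show ¬ (46800:Int) ≤ t by omega), ite_true, ite_false]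
    norm_num
  by_cases h9 : (4100:Int) ≤ t
  · simp only [pvBsearchTree, ge_iff_le, h9, (show (0:Int) ≤ t by omega), (show (100:Int) ≤ t by omega), (show (250:Int) ≤ t by omega), (show (500:Int) ≤ t by omega), (show (800:Int) ≤ t by omega), (show (1300:Int) ≤ t by omega), (show (1800:Int) ≤ t by omega), (show (2400:Int) ≤ t by omega), (show (3200:Int) ≤ t by omega), (show ¬ (5400:Int) ≤ t by omega), (show ¬ (7000:Int) ≤ t by omega), (show ¬ (9300:Int) ≤ t by omega), (show ¬ (12100:Int) ≤ t by omega), (show ¬ (15600:Int) ≤ t by omega), (show ¬ (31200:Int) ≤ t by omega), (show ¬ (46800:Int) ≤ t by omega), ite_true, ite_false]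
    norm_num
  by_cases h8 : (3200:Int) ≤ t
  · simp only [pvBsearchTree, ge_iff_le, h8, (show (0:Int) ≤ t by omega), (show (100:Int) ≤ t by omega), (show (250:Int) ≤ t by omega), (show (500:Int) ≤ t by omega), (show (800:Int) ≤ t by omega), (show (1300:Int) ≤ t by omega), (show (1800:Int) ≤ t by omega), (show (2400:Int) ≤ t by omega), (show ¬ (4100:Int) ≤ t by omega), (show ¬ (5400:Int) ≤ t by omega), (show ¬ (7000:Int) ≤ t by omega), (show ¬ (9300:Int) ≤ t by omega), (show ¬ (12100:Int) ≤ t by omega), (show ¬ (15600:Int) ≤ t by omega), (show ¬ (31200:Int) ≤ t by omega), (show ¬ (46800:Int) ≤ t by omega), ite_true, ite_false]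
    norm_num
  by_cases h7 : (2400:Int) ≤ t
  · simp only [pvBsearchTree, ge_iff_le, h7, (show (0:Int) ≤ t by omega), (show (100:Int) ≤ t by omega), (show (250:Int) ≤ t by omega), (show (500:Int) ≤ t by omega), (show (800:Int) ≤ t by omega), (show (1300:Int) ≤ t by omega), (show (1800:Int) ≤ t by omega), (show ¬ (3200:Int) ≤ t by omega), (show ¬ (4100:Int) ≤ t by omega), (show ¬ (5400:Int) ≤ t by omega), (show ¬ (7000:Int) ≤ t by omega), (show ¬ (9300:Int) ≤ t by omega), (show ¬ (12100:Int) ≤ t by omega), (show ¬ (15600:Int) ≤ t by omega), (show ¬ (31200:Int) ≤ t by omega), (show ¬ (46800:Int) ≤ t by omega), ite_true, ite_false]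
    norm_num
  by_cases h6 : (1800:Int) ≤ t
  · simp only [pvBsearchTree, ge_iff_le, h6, (show (0:Int) ≤ t by omega), (show (100:Int) ≤ t by omega), (show (250:Int) ≤ t by omega), (show (500:Int) ≤ t by omega), (show (800:Int) ≤ t by omega), (show (1300:Int) ≤ t by omega), (show ¬ (2400:Int) ≤ t by omega), (show ¬ (3200:Int) ≤ t by omega), (show ¬ (4100:Int) ≤ t by omega), (show ¬ (5400:Int) ≤ t by omega), (show ¬ (7000:Int) ≤ t by omega), (show ¬ (9300:Int) ≤ t by omega), (show ¬ (12100:Int) ≤ t by omega), (show ¬ (15600:Int) ≤ t by omega), (show ¬ (31200:Int) ≤ t by omega), (show ¬ (46800:Int) ≤ t by omega), ite_true, ite_false]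
    norm_num
  by_cases h5 : (1300:Int) ≤ t
  · simp only [pvBsearchTree, ge_iff_le, h5, (show (0:Int) ≤ t by omega), (show (100:Int) ≤ t by omega), (show (250:Int) ≤ t by omega), (show (500:Int) ≤ t by omega), (show (800:Int) ≤ t by omega), (show ¬ (1800:Int) ≤ t by omega), (show ¬ (2400:Int) ≤ t by omega), (show ¬ (3200:Int) ≤ t by omega), (show ¬ (4100:Int) ≤ t by omega), (show ¬ (5400:Int) ≤ t by omega), (show ¬ (7000:Int) ≤ t by omega), (show ¬ (9300:Int) ≤ t by omega), (show ¬ (12100:Int) ≤ t by omega), (show ¬ (15600:Int) ≤ t by omega), (show ¬ (31200:Int) ≤ t by omega), (show ¬ (46800:Int) ≤ t by omega), ite_true, ite_false]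
    norm_num
  by_cases h4 : (800:Int) ≤ t
  · simp only [pvBsearchTree, ge_iff_le, h4, (show (0:Int) ≤ t by omega), (show (100:Int) ≤ t by omega), (show (250:Int) ≤ t by omega), (show (500:Int) ≤ t by omega), (show ¬ (1300:Int) ≤ t by omega), (show ¬ (1800:Int) ≤ t by omega), (show ¬ (2400:Int) ≤ t by omega), (show ¬ (3200:Int) ≤ t by omega), (show ¬ (4100:Int) ≤ t by omega), (show ¬ (5400:Int) ≤ t by omega), (show ¬ (7000:Int) ≤ t by omega), (show ¬ (9300:Int) ≤ t by omega), (show ¬ (12100:Int) ≤ t by omega), (show ¬ (15600:Int) ≤ t by omega), (show ¬ (31200:Int) ≤ t by omega), (show ¬ (46800:Int) ≤ t by omega), ite_true, ite_false]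
    norm_num
  by_cases h3 : (500:Int) ≤ t
  · simp only [pvBsearchTree, ge_iff_le, h3, (show (0:Int) ≤ t by omega), (show (100:Int) ≤ t by omega), (show (250:Int) ≤ t by omega), (show ¬ (800:Int) ≤ t by omega), (show ¬ (1300:Int) ≤ t by omega), (show ¬ (1800:Int) ≤ t by omega), (show ¬ (2400:Int) ≤ t by omega), (show ¬ (3200:Int) ≤ t by omega), (show ¬ (4100:Int) ≤ t by omega), (show ¬ (5400:Int) ≤ t by omega), (show ¬ (7000:Int) ≤ t by omega), (show ¬ (9300:Int) ≤ t by omega), (show ¬ (12100:Int) ≤ t by omega), (show ¬ (15600:Int) ≤ t by omega), (show ¬ (31200:Int) ≤ t by omega), (show ¬ (46800:Int) ≤ t by omega), ite_true, ite_false]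
    norm_num
  by_cases h2 : (250:Int) ≤ t
  · simp only [pvBsearchTree, ge_iff_le, h2, (show (0:Int) ≤ t by omega), (show (100:Int) ≤ t by omega), (show ¬ (500:Int) ≤ t by omega), (show ¬ (800:Int) ≤ t by omega), (show ¬ (1300:Int) ≤ t by omega), (show ¬ (1800:Int) ≤ t by omega), (show ¬ (2400:Int) ≤ t by omega), (show ¬ (3200:Int) ≤ t by omega), (show ¬ (4100:Int) ≤ t by omega), (show ¬ (5400:Int) ≤ t by omega), (show ¬ (7000:Int) ≤ t by omega), (show ¬ (9300:Int) ≤ t by omega), (show ¬ (12100:Int) ≤ t by omega), (show ¬ (15600:Int) ≤ t by omega), (show ¬ (31200:Int) ≤ t by omega), (show ¬ (46800:Int) ≤ t by omega), ite_true, ite_false]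
    norm_num
  by_cases h1 : (100:Int) ≤ t
  · simp only [pvBsearchTree, ge_iff_le, h1, (show (0:Int) ≤ t by omega), (show ¬ (250:Int) ≤ t by omega), (show ¬ (500:Int) ≤ t by omega), (show ¬ (800:Int) ≤ t by omega), (show ¬ (1300:Int) ≤ t by omega), (show ¬ (1800:Int) ≤ t by omega), (show ¬ (2400:Int) ≤ t by omega), (show ¬ (3200:Int) ≤ t by omega), (show ¬ (4100:Int) ≤ t by omega), (show ¬ (5400:Int) ≤ t by omega), (show ¬ (7000:Int) ≤ t by omega), (show ¬ (9300:Int) ≤ t by omega), (show ¬ (12100:Int) ≤ t by omega), (show ¬ (15600:Int) ≤ t by omega), (show ¬ (31200:Int) ≤ t by omega), (show ¬ (46800:Int) ≤ t by omega), ite_true, ite_false]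
    norm_num
  by_cases h0 : (0:Int) ≤ t
  · simp only [pvBsearchTree, ge_iff_le, h0, (show ¬ (100:Int) ≤ t by omega), (show ¬ (250:Int) ≤ t by omega), (show ¬ (500:Int) ≤ t by omega), (show ¬ (800:Int) ≤ t by omega), (show ¬ (1300:Int) ≤ t by omega), (show ¬ (1800:Int) ≤ t by omega), (show ¬ (2400:Int) ≤ t by omega), (show ¬ (3200:Int) ≤ t by omega), (show ¬ (4100:Int) ≤ t by omega), (show ¬ (5400:Int) ≤ t by omega), (show ¬ (7000:Int) ≤ t by omega), (show ¬ (9300:Int) ≤ t by omega), (show ¬ (12100:Int) ≤ t by omega), (show ¬ (15600:Int) ≤ t by omega), (show ¬ (31200:Int) ≤ t by omega), (show ¬ (46800:Int) ≤ t by omega), ite_true, ite_false]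
    norm_num
  · simp only [pvBsearchTree, ge_iff_le, (show ¬ (0:Int) ≤ t by omega), (show ¬ (100:Int) ≤ t by omega), (show ¬ (250:Int) ≤ t by omega), (show ¬ (500:Int) ≤ t by omega), (show ¬ (800:Int) ≤ t by omega), (show ¬ (1300:Int) ≤ t by omega), (show ¬ (1800:Int) ≤ t by omega), (show ¬ (2400:Int) ≤ t by omega), (show ¬ (3200:Int) ≤ t by omega), (show ¬ (4100:Int) ≤ t by omega), (show ¬ (5400:Int) ≤ t by omega), (show ¬ (7000:Int) ≤ t by omega), (show ¬ (9300:Int) ≤ t by omega), (show ¬ (12100:Int) ≤ t by omega), (show ¬ (15600:Int) ≤ t by omega), (show ¬ (31200:Int) ≤ t by omega), (show ¬ (46800:Int) ≤ t by omega), ite_false]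
    norm_num

theorem get_level_from_summons_spec : Claim_equal_get_level_from_summons := by
  intro t _
  unfold Spec_get_level_from_summons
  rw [A_eval, B_eval]
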